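-- pv_equiv track=rewrite | github.com/jqueiroz/jbozga | jbozga-producer.py | normalize_definition
-- ===== SOURCE A (Python) =====
-- def normalize_definition(definition):
--     new_definition = []
--     for (i, part) in enumerate(definition.split("$")):
--         if i % 2 == 1:
--             for (x, y) in [("1", "₁"), ("2", "₂"), ("3", "₃"), ("4", "₄"), ("5", "₅")]:
--                 part = part.replace("_%s" % x, "%s" % y)
--                 part = part.replace("_{%s}" % x, "%s" % y)
--         new_definition.append(part)
--     return "".join(new_definition)
-- ===== SOURCE B (Python) =====
-- def _sub(c):
--     return {'1': '\u2081', '2': '\u2082', '3': '\u2083', '4': '\u2084', '5': '\u2085'}.get(c)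
--
--
-- def normalize_definition(definition):
--     out = []
--     for (i, part) in enumerate(definition.split("$")):
--         if i % 2 == 1:
--             res = []
--             j = 0
--             n = len(part)
--             while j < n:
--                 if (part[j] == '_' and j + 3 < n and part[j + 1] == '{'
--                         and _sub(part[j + 2]) is not None and part[j + 3] == '}'):
--                     res.append(_sub(part[j + 2]))
--                     j += 4
--                 elif part[j] == '_' and j + 1 < n and _sub(part[j + 1]) is not None:
--                     res.append(_sub(part[j + 1]))
--                     j += 2
--                 else:
--                     res.append(part[j])
--                     j += 1
--             part = "".join(res)
--         out.append(part)
--     return "".join(out)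
-- ===== Notes on version B (the rewrite author's own statement) =====
-- stated objective: alternative
-- what changed: The inner loop of ten sequential str.replace passes over each dollar-delimited math segment is replaced by a single left-to-right scan that rewrites _d and _{d} (d in 1..5, braced form tried first) in one pass using a digit-to-subscript table.
import Mathlib
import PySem

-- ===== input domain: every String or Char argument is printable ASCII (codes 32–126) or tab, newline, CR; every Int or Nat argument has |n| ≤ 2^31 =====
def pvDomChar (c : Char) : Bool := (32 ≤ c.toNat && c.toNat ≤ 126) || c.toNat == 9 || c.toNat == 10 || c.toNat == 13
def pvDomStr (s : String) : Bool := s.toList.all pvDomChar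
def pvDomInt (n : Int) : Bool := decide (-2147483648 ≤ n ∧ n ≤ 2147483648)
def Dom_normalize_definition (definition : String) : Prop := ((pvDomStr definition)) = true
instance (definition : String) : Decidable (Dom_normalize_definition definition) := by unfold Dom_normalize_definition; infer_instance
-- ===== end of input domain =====

-- B replaces A's ten sequential str.replace passes over each math segment by a single
-- left-to-right scan that rewrites _d / _{d} (d = 1..5) in one pass (objective: alternative).

-- ===== PORT A =====
-- literal transliteration of A: split on '$', on odd segments run the 5×2 replace loop, join
def normalize_definition (definition : String) : String :=
  let newDefinition :=
    (PySem.List.enumerate ((PySem.Str.split? definition "$").getD [])).foldl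
      (fun newDef ip =>
        let part :=
          if PySem.Int.mod ip.1 2 == 1 then
            [("1", "₁"), ("2", "₂"), ("3", "₃"), ("4", "₄"), ("5", "₅")].foldl
              (fun part xy =>
                let part := PySem.Str.replace part ("_" ++ xy.1) xy.2
                PySem.Str.replace part ("_{" ++ xy.1 ++ "}") xy.2)
              ip.2
          else ip.2
        newDef ++ [part])
      ([] : List String)
  PySem.Str.join "" newDefinition

-- ===== PORT B =====
-- the subscript table of Source B's _sub helper (dict .get)
def pvSubTable : PySem.Dict Char Char := PySem.Dict.mk [('1', '₁'), ('2', '₂'), ('3', '₃'), ('4', '₄'), ('5', '₅')]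

def pvSub (c : Char) : Option Char := PySem.Dict.get? pvSubTable c

-- Source B's while-loop over indices j, transcribed as structural recursion over the char list:
-- try the braced form _{d}, then the plain form _d, else copy one char.
-- (In the first branch with an unknown digit, Source B's elif tests '{', which is not a table key,
-- so it copies the '_' — exactly the `none => c :: pvScan t` line.)
def pvScan : List Char → List Char
  | [] => []
  | '_' :: '{' :: d :: '}' :: u =>
    (match pvSub d with
    | some y => y :: pvScan u
    | none => '_' :: pvScan ('{' :: d :: '}' :: u))
  | '_' :: d :: u =>
    (match pvSub d with
    | some y => y :: pvScan u
    | none => '_' :: pvScan (d :: u))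
  | c :: t => c :: pvScan t
  termination_by l => l.length
  decreasing_by all_goals (simp only [List.length_cons]; omega)

def normalize_definition_alt (definition : String) : String :=
  let out :=
    (PySem.List.enumerate ((PySem.Str.split? definition "$").getD [])).foldl
      (fun out ip =>
        let part :=
          if PySem.Int.mod ip.1 2 == 1 then String.ofList (pvScan ip.2.toList) else ip.2
        out ++ [part])
      ([] : List String)
  PySem.Str.join "" out

-- ===== PRECONDITION & SPEC =====
def Spec_normalize_definition (definition : String) (out : String) : Prop := out = normalize_definition_alt definition
instance (definition : String) (out : String) : Decidable (Spec_normalize_definition definition out) := by unfold Spec_normalize_definition; infer_instance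

-- ===== CLAIM (what is proved, stated in full; the proofs are below) =====
def Claim_equal_normalize_definition : Prop := ∀ (definition : String), Dom_normalize_definition definition → Spec_normalize_definition definition (normalize_definition definition)

-- ===== LEMMAS AND PROOFS =====

-- clean structural form of Python's str.replace for a nonempty pattern (a :: p) and a
-- one-character replacement y
def pvRep (a : Char) (p : List Char) (y : Char) : List Char → List Char
  | [] => []
  | c :: t =>
    if (a :: p).isPrefixOf (c :: t) then y :: pvRep a p y (t.drop p.length)
    else c :: pvRep a p y t
  termination_by l => l.length
  decreasing_by
  · simp only [List.length_cons, List.length_drop]; omega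
  · simp

-- A's ten replace passes, composed in A's order, on char lists
def pvChain (l : List Char) : List Char :=
  pvRep '_' ['{', '5', '}'] '₅' (pvRep '_' ['5'] '₅' (
  pvRep '_' ['{', '4', '}'] '₄' (pvRep '_' ['4'] '₄' (
  pvRep '_' ['{', '3', '}'] '₃' (pvRep '_' ['3'] '₃' (
  pvRep '_' ['{', '2', '}'] '₂' (pvRep '_' ['2'] '₂' (
  pvRep '_' ['{', '1', '}'] '₁' (pvRep '_' ['1'] '₁' l)))))))))

theorem pvGo_eq (a : Char) (p : List Char) (y : Char) :
    ∀ (fuel : Nat) (l acc : List Char), l.length ≤ fuel →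
      PySem.Chars.replace.go (a :: p) [y] fuel l acc = acc.reverse ++ pvRep a p y l := by
  intro fuel
  induction fuel with
  | zero =>
    intro l acc h
    have hl : l = [] := by cases l with | nil => rfl | cons c t => simp at h
    subst hl
    rw [PySem.Chars.replace.go]
    simp [pvRep]
  | succ n ih =>
    intro l acc h
    cases l with
    | nil => rw [PySem.Chars.replace.go]; simp [pvRep]; omega
    | cons c t =>
      rw [PySem.Chars.replace.go]
      by_cases hp : (a :: p).isPrefixOf (c :: t)
      · simp only [hp, if_true]
        have hlen : (List.drop (a :: p).length (c :: t)).length ≤ n := by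
          simp only [List.length_cons, List.length_drop] at *
          omega
        rw [ih _ _ hlen]
        rw [pvRep]
        simp [hp, List.drop_succ_cons]
      · simp only [hp, if_false, Bool.false_eq_true]
        have hlen : t.length ≤ n := by simp at h; omega
        rw [ih _ _ hlen]
        rw [pvRep]
        simp [hp]

theorem replace_eq_pvRep (s : List Char) (a : Char) (p : List Char) (y : Char) :
    PySem.Chars.replace s (a :: p) [y] = pvRep a p y s := by
  rw [PySem.Chars.replace]
  simp [pvGo_eq a p y s.length s [] (le_refl _)]

theorem pvScan_ne {c : Char} (t : List Char) (hc : c ≠ '_') : pvScan (c :: t) = c :: pvScan t :=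
  pvScan.eq_4 c t (fun _ _ h1 _ => absurd h1 hc) (fun _ _ h1 _ => absurd h1 hc)

theorem pvScan_plain {d : Char} (u : List Char) (hd : d ≠ '{') :
    pvScan ('_' :: d :: u) =
      (match pvSub d with | some y => y :: pvScan u | none => '_' :: pvScan (d :: u)) :=
  pvScan.eq_3 d u (fun _ _ h1 _ => absurd h1 hd)

-- which characters the table maps
theorem pvSub_none_of_ne {d : Char} (h1 : d ≠ '1') (h2 : d ≠ '2') (h3 : d ≠ '3')
    (h4 : d ≠ '4') (h5 : d ≠ '5') : pvSub d = none := by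
  unfold pvSub pvSubTable PySem.Dict.get?
  have e1 : ('1' == d) = false := beq_eq_false_iff_ne.2 (Ne.symm h1)
  have e2 : ('2' == d) = false := beq_eq_false_iff_ne.2 (Ne.symm h2)
  have e3 : ('3' == d) = false := beq_eq_false_iff_ne.2 (Ne.symm h3)
  have e4 : ('4' == d) = false := beq_eq_false_iff_ne.2 (Ne.symm h4)
  have e5 : ('5' == d) = false := beq_eq_false_iff_ne.2 (Ne.symm h5)
  simp [List.find?, e1, e2, e3, e4, e5]

theorem pvSub_key_cases {x : Char} (hx : pvSub x ≠ none) :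
    x = '1' ∨ x = '2' ∨ x = '3' ∨ x = '4' ∨ x = '5' := by
  by_cases h1 : x = '1'; · exact Or.inl h1
  by_cases h2 : x = '2'; · exact Or.inr (Or.inl h2)
  by_cases h3 : x = '3'; · exact Or.inr (Or.inr (Or.inl h3))
  by_cases h4 : x = '4'; · exact Or.inr (Or.inr (Or.inr (Or.inl h4)))
  by_cases h5 : x = '5'; · exact Or.inr (Or.inr (Or.inr (Or.inr h5)))
  exact absurd (pvSub_none_of_ne h1 h2 h3 h4 h5) hx

theorem pvSub_some_cases {d y : Char} (h : pvSub d = some y) :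
    (d = '1' ∧ y = '₁') ∨ (d = '2' ∧ y = '₂') ∨ (d = '3' ∧ y = '₃') ∨
      (d = '4' ∧ y = '₄') ∨ (d = '5' ∧ y = '₅') := by
  rcases pvSub_key_cases (x := d) (by rw [h]; exact Option.some_ne_none y) with rfl | rfl | rfl | rfl | rfl
  · exact Or.inl ⟨rfl, by rw [show pvSub '1' = some '₁' from rfl] at h; exact (Option.some.inj h).symm⟩
  · exact Or.inr (Or.inl ⟨rfl, by rw [show pvSub '2' = some '₂' from rfl] at h; exact (Option.some.inj h).symm⟩)
  · exact Or.inr (Or.inr (Or.inl ⟨rfl, by rw [show pvSub '3' = some '₃' from rfl] at h; exact (Option.some.inj h).symm⟩))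
  · exact Or.inr (Or.inr (Or.inr (Or.inl ⟨rfl, by rw [show pvSub '4' = some '₄' from rfl] at h; exact (Option.some.inj h).symm⟩)))
  · exact Or.inr (Or.inr (Or.inr (Or.inr ⟨rfl, by rw [show pvSub '5' = some '₅' from rfl] at h; exact (Option.some.inj h).symm⟩)))

-- basic pvRep equations
theorem pvRep_neg {a c : Char} {p t : List Char} (y : Char)
    (h : (a :: p).isPrefixOf (c :: t) = false) :
    pvRep a p y (c :: t) = c :: pvRep a p y t := by
  rw [pvRep]; simp [h]

theorem pvRep_head? (a : Char) (p : List Char) (y : Char) (l : List Char) :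
    (pvRep a p y l).head? = some y ∨ (pvRep a p y l).head? = l.head? := by
  cases l with
  | nil => right; rw [pvRep]
  | cons c t =>
    rw [pvRep]
    by_cases h : (a :: p).isPrefixOf (c :: t) <;> simp [h]

-- "does not start with x followed by '}'"
def pvNoBr (x : Char) (l : List Char) : Prop := ∀ u, l = x :: u → u.head? ≠ some '}'

theorem pvRep_noBr {x y : Char} (a : Char) (p : List Char) (hyx : y ≠ x) (hy : y ≠ '}')
    {l : List Char} (h : pvNoBr x l) : pvNoBr x (pvRep a p y l) := by
  cases l with
  | nil => rw [pvRep]; intro u hu; exact absurd hu (by simp)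
  | cons c t =>
    rw [pvRep]
    by_cases hp : (a :: p).isPrefixOf (c :: t)
    · simp only [hp, if_true]
      intro u hu
      exact absurd (List.cons.inj hu).1 hyx
    · simp only [hp, if_false, Bool.false_eq_true]
      intro u hu
      obtain ⟨hcx, hu2⟩ := List.cons.inj hu
      subst hcx
      rw [← hu2]
      rcases pvRep_head? a p y t with hh | hh
      · rw [hh]; simp [hy]
      · rw [hh]; exact h t rfl

-- head of the list is not '_' : every pass copies it
theorem pvRep_ne {c : Char} (hc : c ≠ '_') (p : List Char) (y : Char) (t : List Char) :
    pvRep '_' p y (c :: t) = c :: pvRep '_' p y t := by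
  refine pvRep_neg y ?_
  have e : ('_' == c) = false := beq_eq_false_iff_ne.2 (Ne.symm hc)
  simp [List.isPrefixOf, e]

theorem chain_ne {c : Char} (hc : c ≠ '_') (t : List Char) : pvChain (c :: t) = c :: pvChain t := by
  simp only [pvChain, pvRep_ne hc]

-- '_' followed by a character that triggers nothing
theorem pvRep_us_plain {x : Char} (y : Char) {v : List Char} (hx : v.head? ≠ some x) :
    pvRep '_' [x] y ('_' :: v) = '_' :: pvRep '_' [x] y v := by
  refine pvRep_neg y ?_
  cases v with
  | nil => simp [List.isPrefixOf]
  | cons c w =>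
    have e : (x == c) = false :=
      beq_eq_false_iff_ne.2 (fun e => hx (by rw [List.head?_cons, ← e]))
    simp [List.isPrefixOf, e]

theorem pvRep_us_braced (x y : Char) {v : List Char} (hv : v.head? ≠ some '{') :
    pvRep '_' ['{', x, '}'] y ('_' :: v) = '_' :: pvRep '_' ['{', x, '}'] y v := by
  refine pvRep_neg y ?_
  cases v with
  | nil => simp [List.isPrefixOf]
  | cons c w =>
    have e : ('{' == c) = false :=
      beq_eq_false_iff_ne.2 (fun e => hv (by rw [List.head?_cons, ← e]))
    simp [List.isPrefixOf, e]

def pvHeadOk (v : List Char) : Prop := ∀ c, v.head? = some c → (c ≠ '{' ∧ pvSub c = none)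

theorem pvHeadOk_pres (a : Char) (p : List Char) {y : Char} (hy1 : y ≠ '{')
    (hy2 : pvSub y = none) {v : List Char} (h : pvHeadOk v) : pvHeadOk (pvRep a p y v) := by
  intro c hc
  rcases pvRep_head? a p y v with hh | hh
  · rw [hh] at hc; cases Option.some.inj hc; exact ⟨hy1, hy2⟩
  · exact h c (by rw [← hh]; exact hc)

theorem headOk_ne_key {v : List Char} (h : pvHeadOk v) (x : Char) (hx : pvSub x ≠ none) :
    v.head? ≠ some x := fun e => hx ((h x e).2)

theorem headOk_ne_brace {v : List Char} (h : pvHeadOk v) : v.head? ≠ some '{' :=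
  fun e => (h '{' e).1 rfl

theorem chain_us {v : List Char} (h : pvHeadOk v) : pvChain ('_' :: v) = '_' :: pvChain v := by
  have h0 := h
  have h1 : pvHeadOk (pvRep '_' ['1'] '₁' v) :=
    pvHeadOk_pres _ _ (by decide) (by decide) h0
  have h2 : pvHeadOk (pvRep '_' ['{','1','}'] '₁' (pvRep '_' ['1'] '₁' v)) :=
    pvHeadOk_pres _ _ (by decide) (by decide) h1
  have h3 : pvHeadOk (pvRep '_' ['2'] '₂' (pvRep '_' ['{','1','}'] '₁' (pvRep '_' ['1'] '₁' v))) :=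
    pvHeadOk_pres _ _ (by decide) (by decide) h2
  have h4 : pvHeadOk (pvRep '_' ['{','2','}'] '₂' (pvRep '_' ['2'] '₂' (pvRep '_' ['{','1','}'] '₁' (pvRep '_' ['1'] '₁' v)))) :=
    pvHeadOk_pres _ _ (by decide) (by decide) h3
  have h5 : pvHeadOk (pvRep '_' ['3'] '₃' (pvRep '_' ['{','2','}'] '₂' (pvRep '_' ['2'] '₂' (pvRep '_' ['{','1','}'] '₁' (pvRep '_' ['1'] '₁' v))))) :=
    pvHeadOk_pres _ _ (by decide) (by decide) h4
  have h6 : pvHeadOk (pvRep '_' ['{','3','}'] '₃' (pvRep '_' ['3'] '₃' (pvRep '_' ['{','2','}'] '₂' (pvRep '_' ['2'] '₂' (pvRep '_' ['{','1','}'] '₁' (pvRep '_' ['1'] '₁' v)))))) :=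
    pvHeadOk_pres _ _ (by decide) (by decide) h5
  have h7 : pvHeadOk (pvRep '_' ['4'] '₄' (pvRep '_' ['{','3','}'] '₃' (pvRep '_' ['3'] '₃' (pvRep '_' ['{','2','}'] '₂' (pvRep '_' ['2'] '₂' (pvRep '_' ['{','1','}'] '₁' (pvRep '_' ['1'] '₁' v))))))) :=
    pvHeadOk_pres _ _ (by decide) (by decide) h6
  have h8 : pvHeadOk (pvRep '_' ['{','4','}'] '₄' (pvRep '_' ['4'] '₄' (pvRep '_' ['{','3','}'] '₃' (pvRep '_' ['3'] '₃' (pvRep '_' ['{','2','}'] '₂' (pvRep '_' ['2'] '₂' (pvRep '_' ['{','1','}'] '₁' (pvRep '_' ['1'] '₁' v)))))))) :=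
    pvHeadOk_pres _ _ (by decide) (by decide) h7
  have h9 : pvHeadOk (pvRep '_' ['5'] '₅' (pvRep '_' ['{','4','}'] '₄' (pvRep '_' ['4'] '₄' (pvRep '_' ['{','3','}'] '₃' (pvRep '_' ['3'] '₃' (pvRep '_' ['{','2','}'] '₂' (pvRep '_' ['2'] '₂' (pvRep '_' ['{','1','}'] '₁' (pvRep '_' ['1'] '₁' v))))))))) :=
    pvHeadOk_pres _ _ (by decide) (by decide) h8
  unfold pvChain
  rw [pvRep_us_plain '₁' (headOk_ne_key h0 '1' (by decide)),
      pvRep_us_braced '1' '₁' (headOk_ne_brace h1),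
      pvRep_us_plain '₂' (headOk_ne_key h2 '2' (by decide)),
      pvRep_us_braced '2' '₂' (headOk_ne_brace h3),
      pvRep_us_plain '₃' (headOk_ne_key h4 '3' (by decide)),
      pvRep_us_braced '3' '₃' (headOk_ne_brace h5),
      pvRep_us_plain '₄' (headOk_ne_key h6 '4' (by decide)),
      pvRep_us_braced '4' '₄' (headOk_ne_brace h7),
      pvRep_us_plain '₅' (headOk_ne_key h8 '5' (by decide)),
      pvRep_us_braced '5' '₅' (headOk_ne_brace h9)]

-- '_' '{' prefix with no complete group _{d} anywhere at the front
theorem pvRep_uu_plain {e : Char} (y : Char) (he : e ≠ '{') (v : List Char) :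
    pvRep '_' [e] y ('_' :: '{' :: v) = '_' :: '{' :: pvRep '_' [e] y v := by
  have e1 : (e == '{') = false := beq_eq_false_iff_ne.2 he
  rw [pvRep_neg y (by simp [List.isPrefixOf, e1])]
  rw [pvRep_neg y (by simp [List.isPrefixOf])]

theorem pvRep_uu_braced (x y : Char) {v : List Char} (h : pvNoBr x v) :
    pvRep '_' ['{', x, '}'] y ('_' :: '{' :: v) = '_' :: '{' :: pvRep '_' ['{', x, '}'] y v := by
  have c1 : (['_', '{', x, '}'].isPrefixOf ('_' :: '{' :: v)) = false := by
    cases v with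
    | nil => simp [List.isPrefixOf]
    | cons c w =>
      cases w with
      | nil => simp [List.isPrefixOf]
      | cons c2 w2 =>
        by_cases hxc : x = c
        · have e2 : ('}' == c2) = false :=
            beq_eq_false_iff_ne.2
              (fun e => h (c2 :: w2) (by rw [hxc]) (by rw [List.head?_cons, ← e]))
          simp [List.isPrefixOf, e2]
        · have e1 : (x == c) = false := beq_eq_false_iff_ne.2 hxc
          simp [List.isPrefixOf, e1]
  rw [pvRep_neg y c1]
  rw [pvRep_neg y (by simp [List.isPrefixOf])]

def pvAllNoBr (v : List Char) : Prop := ∀ x, pvSub x ≠ none → pvNoBr x v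

theorem pvAllNoBr_pres (a : Char) (p : List Char) {y : Char}
    (hyk : ∀ x, pvSub x ≠ none → y ≠ x) (hy2 : y ≠ '}')
    {v : List Char} (h : pvAllNoBr v) : pvAllNoBr (pvRep a p y v) :=
  fun x hx => pvRep_noBr a p (hyk x hx) hy2 (h x hx)

theorem sub_ne_keys {y : Char} (hy : y ∈ (['₁','₂','₃','₄','₅'] : List Char)) :
    ∀ x, pvSub x ≠ none → y ≠ x := by
  intro x hx
  rcases pvSub_key_cases hx with rfl | rfl | rfl | rfl | rfl <;> fin_cases hy <;> decide

theorem chain_uu {v : List Char} (h : pvAllNoBr v) :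
    pvChain ('_' :: '{' :: v) = '_' :: '{' :: pvChain v := by
  have h0 := h
  have h1 : pvAllNoBr (pvRep '_' ['1'] '₁' v) :=
    pvAllNoBr_pres _ _ (sub_ne_keys (by decide)) (by decide) h0
  have h2 : pvAllNoBr (pvRep '_' ['{','1','}'] '₁' (pvRep '_' ['1'] '₁' v)) :=
    pvAllNoBr_pres _ _ (sub_ne_keys (by decide)) (by decide) h1
  have h3 : pvAllNoBr (pvRep '_' ['2'] '₂' (pvRep '_' ['{','1','}'] '₁' (pvRep '_' ['1'] '₁' v))) :=
    pvAllNoBr_pres _ _ (sub_ne_keys (by decide)) (by decide) h2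
  have h4 : pvAllNoBr (pvRep '_' ['{','2','}'] '₂' (pvRep '_' ['2'] '₂' (pvRep '_' ['{','1','}'] '₁' (pvRep '_' ['1'] '₁' v)))) :=
    pvAllNoBr_pres _ _ (sub_ne_keys (by decide)) (by decide) h3
  have h5 : pvAllNoBr (pvRep '_' ['3'] '₃' (pvRep '_' ['{','2','}'] '₂' (pvRep '_' ['2'] '₂' (pvRep '_' ['{','1','}'] '₁' (pvRep '_' ['1'] '₁' v))))) :=
    pvAllNoBr_pres _ _ (sub_ne_keys (by decide)) (by decide) h4
  have h6 : pvAllNoBr (pvRep '_' ['{','3','}'] '₃' (pvRep '_' ['3'] '₃' (pvRep '_' ['{','2','}'] '₂' (pvRep '_' ['2'] '₂' (pvRep '_' ['{','1','}'] '₁' (pvRep '_' ['1'] '₁' v)))))) :=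
    pvAllNoBr_pres _ _ (sub_ne_keys (by decide)) (by decide) h5
  have h7 : pvAllNoBr (pvRep '_' ['4'] '₄' (pvRep '_' ['{','3','}'] '₃' (pvRep '_' ['3'] '₃' (pvRep '_' ['{','2','}'] '₂' (pvRep '_' ['2'] '₂' (pvRep '_' ['{','1','}'] '₁' (pvRep '_' ['1'] '₁' v))))))) :=
    pvAllNoBr_pres _ _ (sub_ne_keys (by decide)) (by decide) h6
  have h8 : pvAllNoBr (pvRep '_' ['{','4','}'] '₄' (pvRep '_' ['4'] '₄' (pvRep '_' ['{','3','}'] '₃' (pvRep '_' ['3'] '₃' (pvRep '_' ['{','2','}'] '₂' (pvRep '_' ['2'] '₂' (pvRep '_' ['{','1','}'] '₁' (pvRep '_' ['1'] '₁' v)))))))) :=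
    pvAllNoBr_pres _ _ (sub_ne_keys (by decide)) (by decide) h7
  have h9 : pvAllNoBr (pvRep '_' ['5'] '₅' (pvRep '_' ['{','4','}'] '₄' (pvRep '_' ['4'] '₄' (pvRep '_' ['{','3','}'] '₃' (pvRep '_' ['3'] '₃' (pvRep '_' ['{','2','}'] '₂' (pvRep '_' ['2'] '₂' (pvRep '_' ['{','1','}'] '₁' (pvRep '_' ['1'] '₁' v))))))))) :=
    pvAllNoBr_pres _ _ (sub_ne_keys (by decide)) (by decide) h8
  unfold pvChain
  rw [pvRep_uu_plain '₁' (by decide) v,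
      pvRep_uu_braced '1' '₁' (h1 '1' (by decide)),
      pvRep_uu_plain '₂' (by decide) _,
      pvRep_uu_braced '2' '₂' (h3 '2' (by decide)),
      pvRep_uu_plain '₃' (by decide) _,
      pvRep_uu_braced '3' '₃' (h5 '3' (by decide)),
      pvRep_uu_plain '₄' (by decide) _,
      pvRep_uu_braced '4' '₄' (h7 '4' (by decide)),
      pvRep_uu_plain '₅' (by decide) _,
      pvRep_uu_braced '5' '₅' (h9 '5' (by decide))]

-- the five matching cases, with everything literal at the front
theorem chain_plain_1 (t : List Char) : pvChain ('_' :: '1' :: t) = '₁' :: pvChain t := by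
  simp [pvChain, pvRep, List.isPrefixOf]
theorem chain_plain_2 (t : List Char) : pvChain ('_' :: '2' :: t) = '₂' :: pvChain t := by
  simp [pvChain, pvRep, List.isPrefixOf]
theorem chain_plain_3 (t : List Char) : pvChain ('_' :: '3' :: t) = '₃' :: pvChain t := by
  simp [pvChain, pvRep, List.isPrefixOf]
theorem chain_plain_4 (t : List Char) : pvChain ('_' :: '4' :: t) = '₄' :: pvChain t := by
  simp [pvChain, pvRep, List.isPrefixOf]
theorem chain_plain_5 (t : List Char) : pvChain ('_' :: '5' :: t) = '₅' :: pvChain t := by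
  simp [pvChain, pvRep, List.isPrefixOf]
theorem chain_braced_1 (t : List Char) : pvChain ('_' :: '{' :: '1' :: '}' :: t) = '₁' :: pvChain t := by
  simp [pvChain, pvRep, List.isPrefixOf]
theorem chain_braced_2 (t : List Char) : pvChain ('_' :: '{' :: '2' :: '}' :: t) = '₂' :: pvChain t := by
  simp [pvChain, pvRep, List.isPrefixOf]
theorem chain_braced_3 (t : List Char) : pvChain ('_' :: '{' :: '3' :: '}' :: t) = '₃' :: pvChain t := by
  simp [pvChain, pvRep, List.isPrefixOf]
theorem chain_braced_4 (t : List Char) : pvChain ('_' :: '{' :: '4' :: '}' :: t) = '₄' :: pvChain t := by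
  simp [pvChain, pvRep, List.isPrefixOf]
theorem chain_braced_5 (t : List Char) : pvChain ('_' :: '{' :: '5' :: '}' :: t) = '₅' :: pvChain t := by
  simp [pvChain, pvRep, List.isPrefixOf]

theorem chain_nil : pvChain [] = [] := by simp [pvChain, pvRep]

theorem chain_eq_scan (l : List Char) : pvChain l = pvScan l := by
  have main : ∀ (n : Nat) (l : List Char), l.length ≤ n → pvChain l = pvScan l := by
    intro n
    induction n with
    | zero =>
      intro l h
      have hl : l = [] := by cases l with | nil => rfl | cons c t => simp at h
      subst hl
      rw [chain_nil, pvScan]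
    | succ n ih =>
      intro l hl
      cases l with
      | nil => rw [chain_nil, pvScan]
      | cons c t =>
        by_cases hc : c = '_'
        · subst hc
          cases t with
          | nil =>
            rw [chain_us (v := []) (by intro c hc; simp at hc)]
            rw [pvScan.eq_4 '_' [] (fun _ _ _ h2 => by cases h2) (fun _ _ _ h2 => by cases h2)]
            rw [chain_nil, pvScan]
          | cons c2 u =>
            by_cases h2 : c2 = '{'
            · subst h2
              have hne : ('{' : Char) ≠ '_' := by decide
              rcases u with _ | ⟨d, _ | ⟨e, w⟩⟩
              · -- l = ['_', '{']
                rw [chain_uu (v := []) (fun x _ => fun u hu => by cases hu)]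
                rw [pvScan.eq_3 '{' [] (fun _ _ _ hshape => by cases hshape)]
                rw [show pvSub '{' = none from rfl]
                rw [pvScan_ne [] hne]
                rw [chain_nil, pvScan]
              · -- l = ['_', '{', d]
                rw [chain_uu (v := [d]) (fun x _ => fun u hu => by
                  obtain ⟨-, hu2⟩ := List.cons.inj hu; subst hu2; simp)]
                rw [pvScan.eq_3 '{' [d] (fun _ _ _ hshape => by
                  obtain ⟨-, hbad⟩ := List.cons.inj hshape; cases hbad)]
                rw [show pvSub '{' = none from rfl]
                rw [pvScan_ne [d] hne]
                have hIH : pvChain [d] = pvScan [d] := ih [d] (by simp at hl ⊢; omega)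
                rw [hIH]
              · -- l = '_' :: '{' :: d :: e :: w
                by_cases hbr : e = '}' ∧ pvSub d ≠ none
                · obtain ⟨rfl, hd⟩ := hbr
                  cases hsome : pvSub d with
                  | none => exact absurd hsome hd
                  | some y =>
                    have hIH : pvChain w = pvScan w := ih w (by simp at hl ⊢; omega)
                    rcases pvSub_some_cases hsome with ⟨rfl, rfl⟩ | ⟨rfl, rfl⟩ | ⟨rfl, rfl⟩ | ⟨rfl, rfl⟩ | ⟨rfl, rfl⟩
                    · rw [chain_braced_1, pvScan.eq_2, show pvSub '1' = some '₁' from rfl, hIH]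
                    · rw [chain_braced_2, pvScan.eq_2, show pvSub '2' = some '₂' from rfl, hIH]
                    · rw [chain_braced_3, pvScan.eq_2, show pvSub '3' = some '₃' from rfl, hIH]
                    · rw [chain_braced_4, pvScan.eq_2, show pvSub '4' = some '₄' from rfl, hIH]
                    · rw [chain_braced_5, pvScan.eq_2, show pvSub '5' = some '₅' from rfl, hIH]
                · -- no substitution group at the front
                  have hAll : pvAllNoBr (d :: e :: w) := by
                    intro x hx u hu
                    obtain ⟨hdx, hu2⟩ := List.cons.inj hu
                    subst hu2
                    rw [List.head?_cons]
                    intro he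
                    exact hbr ⟨Option.some.inj he, hdx ▸ hx⟩
                  rw [chain_uu hAll]
                  have hIH : pvChain (d :: e :: w) = pvScan (d :: e :: w) :=
                    ih _ (by simp at hl ⊢; omega)
                  by_cases he : e = '}'
                  · subst he
                    have hdnone : pvSub d = none := by
                      by_cases hn : pvSub d = none
                      · exact hn
                      · exact absurd ⟨rfl, hn⟩ hbr
                    rw [pvScan.eq_2, hdnone, pvScan_ne _ hne, hIH]
                  · rw [pvScan.eq_3 '{' (d :: e :: w) (fun _ _ _ hshape => by
                      obtain ⟨-, hsh2⟩ := List.cons.inj hshape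
                      exact he (List.cons.inj hsh2).1)]
                    rw [show pvSub '{' = none from rfl]
                    rw [pvScan_ne _ hne, hIH]
            · -- c2 ≠ '{'
              cases hsome : pvSub c2 with
              | some y =>
                have hIH : pvChain u = pvScan u := ih u (by simp at hl ⊢; omega)
                rcases pvSub_some_cases hsome with ⟨rfl, rfl⟩ | ⟨rfl, rfl⟩ | ⟨rfl, rfl⟩ | ⟨rfl, rfl⟩ | ⟨rfl, rfl⟩
                · rw [chain_plain_1, pvScan_plain u h2, show pvSub '1' = some '₁' from rfl, hIH]
                · rw [chain_plain_2, pvScan_plain u h2, show pvSub '2' = some '₂' from rfl, hIH]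
                · rw [chain_plain_3, pvScan_plain u h2, show pvSub '3' = some '₃' from rfl, hIH]
                · rw [chain_plain_4, pvScan_plain u h2, show pvSub '4' = some '₄' from rfl, hIH]
                · rw [chain_plain_5, pvScan_plain u h2, show pvSub '5' = some '₅' from rfl, hIH]
              | none =>
                have hOk : pvHeadOk (c2 :: u) := by
                  intro c hcc
                  rw [List.head?_cons] at hcc
                  cases Option.some.inj hcc
                  exact ⟨h2, hsome⟩
                rw [chain_us hOk]
                rw [pvScan_plain u h2, hsome]
                have hIH : pvChain (c2 :: u) = pvScan (c2 :: u) := ih _ (by simp at hl ⊢; omega)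
                rw [hIH]
        · rw [chain_ne hc, pvScan_ne t hc]
          exact congrArg _ (ih t (by simp at hl; omega))
  exact main l.length l (le_refl _)

theorem part_eq (s : String) :
    [("1", "₁"), ("2", "₂"), ("3", "₃"), ("4", "₄"), ("5", "₅")].foldl
      (fun part xy =>
        let part := PySem.Str.replace part ("_" ++ xy.1) xy.2
        PySem.Str.replace part ("_{" ++ xy.1 ++ "}") xy.2) s
    = String.ofList (pvScan s.toList) := by
  apply String.toList_inj.1
  simp only [List.foldl]
  simp only [PySem.Str.toList_replace, String.toList_ofList]
  rw [show ("_" ++ "1").toList = ['_', '1'] from rfl,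
      show ("_{" ++ "1" ++ "}").toList = ['_', '{', '1', '}'] from rfl,
      show ("_" ++ "2").toList = ['_', '2'] from rfl,
      show ("_{" ++ "2" ++ "}").toList = ['_', '{', '2', '}'] from rfl,
      show ("_" ++ "3").toList = ['_', '3'] from rfl,
      show ("_{" ++ "3" ++ "}").toList = ['_', '{', '3', '}'] from rfl,
      show ("_" ++ "4").toList = ['_', '4'] from rfl,
      show ("_{" ++ "4" ++ "}").toList = ['_', '{', '4', '}'] from rfl,
      show ("_" ++ "5").toList = ['_', '5'] from rfl,
      show ("_{" ++ "5" ++ "}").toList = ['_', '{', '5', '}'] from rfl,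
      show ("₁").toList = ['₁'] from rfl,
      show ("₂").toList = ['₂'] from rfl,
      show ("₃").toList = ['₃'] from rfl,
      show ("₄").toList = ['₄'] from rfl,
      show ("₅").toList = ['₅'] from rfl]
  simp only [replace_eq_pvRep]
  exact chain_eq_scan s.toList

-- ===== VERDICT (by name: the statement is the Claim_ definition above) =====
theorem normalize_definition_spec : Claim_equal_normalize_definition := by
  intro definition _
  unfold Spec_normalize_definition normalize_definition normalize_definition_alt
  have hfun :
      (fun (newDef : List String) (ip : Int × String) =>
        let part :=
          if PySem.Int.mod ip.1 2 == 1 then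
            [("1", "₁"), ("2", "₂"), ("3", "₃"), ("4", "₄"), ("5", "₅")].foldl
              (fun part xy =>
                let part := PySem.Str.replace part ("_" ++ xy.1) xy.2
                PySem.Str.replace part ("_{" ++ xy.1 ++ "}") xy.2)
              ip.2
          else ip.2
        newDef ++ [part])
      = (fun (out : List String) (ip : Int × String) =>
        let part :=
          if PySem.Int.mod ip.1 2 == 1 then String.ofList (pvScan ip.2.toList) else ip.2
        out ++ [part]) := by
    funext acc ip
    dsimp only
    by_cases hodd : PySem.Int.mod ip.1 2 == 1
    · simp only [hodd, if_true, part_eq]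
    · simp only [hodd]; simp
  exact congrArg (fun f => PySem.Str.join ""
    ((PySem.List.enumerate ((PySem.Str.split? definition "$").getD [])).foldl f ([] : List String))) hfun
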